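-- pv_equiv track=rewrite | github.com/ReinhardSailo/laba2.4 | individuals2.py | find_sum_after_positive
-- ===== SOURCE A (Python) =====
-- def find_sum_after_positive(arr):
--     sum_after_positive = 0
--     positive_found = False
--
--     for num in arr:
--         if positive_found:
--             sum_after_positive += num
--         elif num > 0:
--             positive_found = True
--
--     return sum_after_positive
-- ===== SOURCE B (Python) =====
-- def find_sum_after_positive(arr):
--     items = list(arr)
--     total = sum(items)
--     dropped = 0
--     for x in items:
--         dropped += x
--         if x > 0:
--             return total - dropped
--     return 0
-- ===== Notes on version B (the rewrite author's own statement) =====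
-- stated objective: alternative
-- what changed: Instead of conditionally accumulating elements after the first positive, B computes the total sum up front and subtracts the prefix sum through the first positive element (early return), returning 0 if no positive exists.
import Mathlib
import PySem

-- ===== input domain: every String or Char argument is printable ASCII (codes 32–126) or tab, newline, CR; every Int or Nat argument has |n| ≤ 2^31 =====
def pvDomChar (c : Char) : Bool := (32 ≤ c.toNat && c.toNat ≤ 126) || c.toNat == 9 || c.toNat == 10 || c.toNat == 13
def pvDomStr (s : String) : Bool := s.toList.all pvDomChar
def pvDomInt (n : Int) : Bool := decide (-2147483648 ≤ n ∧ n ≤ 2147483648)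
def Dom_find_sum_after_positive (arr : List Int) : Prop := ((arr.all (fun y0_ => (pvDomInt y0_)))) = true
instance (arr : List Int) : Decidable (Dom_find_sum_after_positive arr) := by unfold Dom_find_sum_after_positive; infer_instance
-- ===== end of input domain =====

-- B computes the total sum first and subtracts the prefix sum through the first positive element (alternative arithmetic decomposition).

-- ===== PORT A =====
-- A's loop: accumulator plus a 'positive_found' flag, branch per element.
def findSumLoopA : List Int → Int → Bool → Int
  | [], s, _ => s
  | n :: t, s, true => findSumLoopA t (s + n) true
  | n :: t, s, false =>
    if n > 0 then findSumLoopA t s true else findSumLoopA t s false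

def find_sum_after_positive (arr : List Int) : Int :=
  findSumLoopA arr 0 false

-- ===== PORT B =====
-- B's loop: accumulate the dropped prefix; on the first positive, return total minus dropped.
def findSumLoopB : List Int → Int → Int → Int
  | [], _, _ => 0
  | x :: t, total, dropped =>
    let d := dropped + x
    if x > 0 then total - d else findSumLoopB t total d

def find_sum_after_positive_alt (arr : List Int) : Int :=
  findSumLoopB arr arr.sum 0

-- ===== PRECONDITION & SPEC =====
def Spec_find_sum_after_positive (arr : List Int) (out : Int) : Prop := out = find_sum_after_positive_alt arr
instance (arr : List Int) (out : Int) : Decidable (Spec_find_sum_after_positive arr out) := by unfold Spec_find_sum_after_positive; infer_instance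

-- ===== CLAIM (what is proved, stated in full; the proofs are below) =====
def Claim_equal_find_sum_after_positive : Prop := ∀ (arr : List Int), Dom_find_sum_after_positive arr → Spec_find_sum_after_positive arr (find_sum_after_positive arr)

-- ===== LEMMAS AND PROOFS =====
theorem findSumLoopA_true (t : List Int) : ∀ s : Int, findSumLoopA t s true = s + t.sum := by
  induction t with
  | nil => intro s; simp [findSumLoopA]
  | cons n t ih => intro s; simp [findSumLoopA, ih]; ring

theorem loopB_eq_loopA (t : List Int) :
    ∀ c : Int, findSumLoopB t (c + t.sum) c = findSumLoopA t 0 false := by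
  induction t with
  | nil => intro c; simp [findSumLoopB, findSumLoopA]
  | cons x t ih =>
    intro c
    by_cases h : x > 0
    · simp [findSumLoopB, findSumLoopA, h, findSumLoopA_true]
    · have : c + (x :: t).sum = (c + x) + t.sum := by simp; ring
      simp only [findSumLoopB, findSumLoopA, this, if_neg h]
      exact ih (c + x)

-- ===== VERDICT (by name: the statement is the Claim_ definition above) =====
theorem find_sum_after_positive_spec : Claim_equal_find_sum_after_positive := by
  intro arr _
  unfold Spec_find_sum_after_positive find_sum_after_positive find_sum_after_positive_alt
  have := loopB_eq_loopA arr 0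
  simpa using this.symm
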